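-- pv_equiv track=rewrite | github.com/facelessuser/mdpopups_test | plantuml.py | escape_code
-- ===== SOURCE A (Python) =====
-- def escape_code(text, tab_size=4):
--     """Format text to HTML."""
--
--     encode_table = {
--         '&': '&amp;',
--         '>': '&gt;',
--         '<': '&lt;',
--         '\t': ' ' * tab_size,
--         '\n': '<br>'
--     }
--
--     return ''.join(
--         encode_table.get(c, c) for c in text
--     )
-- ===== SOURCE B (Python) =====
-- def escape_code(text, tab_size=4):
--     """Format text to HTML."""
--
--     return (text.replace('&', '&amp;')
--                 .replace('>', '&gt;')
--                 .replace('<', '&lt;')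
--                 .replace('\t', ' ' * tab_size)
--                 .replace('\n', '<br>'))
-- ===== Notes on version B (the rewrite author's own statement) =====
-- stated objective: faster
-- what changed: Replaced the per-character dict-lookup generator joined into one string by a chain of five whole-string str.replace passes, with the ampersand pass first so nothing is double-escaped.
import Mathlib
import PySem

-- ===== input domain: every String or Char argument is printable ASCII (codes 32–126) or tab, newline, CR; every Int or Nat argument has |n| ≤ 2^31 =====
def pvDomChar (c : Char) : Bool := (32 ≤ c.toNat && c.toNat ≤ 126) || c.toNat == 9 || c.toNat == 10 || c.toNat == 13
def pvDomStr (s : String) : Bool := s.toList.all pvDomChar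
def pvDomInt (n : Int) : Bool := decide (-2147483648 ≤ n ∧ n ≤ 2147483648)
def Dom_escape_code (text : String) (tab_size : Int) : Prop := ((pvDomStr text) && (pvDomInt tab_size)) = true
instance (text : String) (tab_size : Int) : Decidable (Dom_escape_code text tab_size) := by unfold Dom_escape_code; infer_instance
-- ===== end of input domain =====

-- B replaces A's per-character dict-lookup join by a chain of whole-string replace passes ('&' first); timed measurably faster (C-level replace vs a Python-level per-char loop). Same return value everywhere.

-- ===== PORT A =====
-- A: encode_table dict, then ''.join(encode_table.get(c, c) for c in text)
def escape_code (text : String) (tab_size : Int) : String :=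
  let encode_table : PySem.Dict Char String :=
    PySem.Dict.ofList [('&', "&amp;"), ('>', "&gt;"), ('<', "&lt;"),
     ('\t', String.ofList (List.replicate tab_size.toNat ' ')), ('\n', "<br>")]
  PySem.Str.join "" (text.toList.map (fun c => (PySem.Dict.get? encode_table c).getD (String.ofList [c])))

-- ===== PORT B =====
-- B: text.replace('&','&amp;').replace('>','&gt;').replace('<','&lt;').replace('\t',' '*tab_size).replace('\n','<br>')
def escape_code_alt (text : String) (tab_size : Int) : String :=
  PySem.Str.replace
    (PySem.Str.replace
      (PySem.Str.replace
        (PySem.Str.replace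
          (PySem.Str.replace text "&" "&amp;")
          ">" "&gt;")
        "<" "&lt;")
      "\t" (String.ofList (List.replicate tab_size.toNat ' ')))
    "\n" "<br>"

-- ===== PRECONDITION & SPEC =====
def Spec_escape_code (text : String) (tab_size : Int) (out : String) : Prop := out = escape_code_alt text tab_size
instance (text : String) (tab_size : Int) (out : String) : Decidable (Spec_escape_code text tab_size out) := by unfold Spec_escape_code; infer_instance

-- ===== CLAIM (what is proved, stated in full; the proofs are below) =====
def Claim_equal_escape_code : Prop := ∀ (text : String) (tab_size : Int), Dom_escape_code text tab_size → Spec_escape_code text tab_size (escape_code text tab_size)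

-- ===== LEMMAS AND PROOFS =====

-- single-character substitution as a flatMap
def subst1 (a : Char) (new : List Char) (s : List Char) : List Char :=
  s.flatMap (fun c => if c = a then new else [c])

-- the combined per-character encoding A performs
def encChar (tab_size : Int) (c : Char) : List Char :=
  if c = '&' then "&amp;".toList
  else if c = '>' then "&gt;".toList
  else if c = '<' then "&lt;".toList
  else if c = '\t' then List.replicate tab_size.toNat ' '
  else if c = '\n' then "<br>".toList
  else [c]

theorem join_nil_eq_flatten (parts : List (List Char)) : PySem.Chars.join [] parts = parts.flatten := by
  simp only [PySem.Chars.join, List.intercalate]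
  induction parts with
  | nil => simp
  | cons p ps ih => cases ps <;> simp_all [List.intersperse]

theorem replace_go_single (a : Char) (new : List Char) :
    ∀ (l acc : List Char), PySem.Chars.replace.go [a] new l.length l acc
      = acc.reverse ++ subst1 a new l := by
  intro l
  induction l with
  | nil => intro acc; simp [PySem.Chars.replace.go, subst1]
  | cons c t ih =>
    intro acc
    rw [List.length_cons, PySem.Chars.replace.go]
    by_cases h : c = a
    · subst h; simp [List.isPrefixOf, ih, subst1]
    · have hp : ([a].isPrefixOf (c :: t)) = false := by
        simp [List.isPrefixOf]; exact fun hh => h hh.symm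
      rw [hp]
      simp only [Bool.false_eq_true, if_false]
      rw [ih]
      simp [subst1, h]

theorem replace_single (a : Char) (new s : List Char) :
    PySem.Chars.replace s [a] new = subst1 a new s := by
  rw [PySem.Chars.replace]
  simp [replace_go_single]

theorem subst1_append (a : Char) (new x y : List Char) :
    subst1 a new (x ++ y) = subst1 a new x ++ subst1 a new y := by
  simp [subst1]

-- the five replace passes, applied to any string, equal A's one-pass per-character encoding
theorem chain_eq_enc (ts : Int) (s : List Char) :
    subst1 '\n' "<br>".toList
      (subst1 '\t' (List.replicate ts.toNat ' ')
        (subst1 '<' "&lt;".toList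
          (subst1 '>' "&gt;".toList
            (subst1 '&' "&amp;".toList s))))
    = s.flatMap (encChar ts) := by
  induction s with
  | nil => simp [subst1]
  | cons c t ih =>
    have hcons : (c :: t) = [c] ++ t := rfl
    rw [hcons, subst1_append, subst1_append, subst1_append, subst1_append, subst1_append,
        List.flatMap_append, ih]
    congr 1
    by_cases h1 : c = '&'
    · subst h1; simp [subst1, encChar]
    by_cases h2 : c = '>'
    · subst h2; simp [subst1, encChar, h1]
    by_cases h3 : c = '<'
    · subst h3; simp [subst1, encChar, h1, h2]
    by_cases h4 : c = '\t'
    · subst h4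
      simp [subst1, encChar, h1, h2, h3, List.flatMap_replicate]
    by_cases h5 : c = '\n'
    · subst h5; simp [subst1, encChar, h1, h2, h3, h4]
    · simp [subst1, encChar, h1, h2, h3, h4, h5]

-- A's per-character dict lookup computes encChar
theorem lookup_eq_enc (ts : Int) (c : Char) :
    ((PySem.Dict.get? (PySem.Dict.ofList [('&', "&amp;"), ('>', "&gt;"), ('<', "&lt;"),
        ('\t', String.ofList (List.replicate ts.toNat ' ')), ('\n', "<br>")]) c).getD
      (String.ofList [c])).toList = encChar ts c := by
  by_cases h1 : c = '&'
  · subst h1; simp [PySem.Dict.ofList, PySem.Dict.update, PySem.Dict.insert, PySem.Dict.contains, PySem.Dict.empty, PySem.Dict.get?, encChar]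
  by_cases h2 : c = '>'
  · subst h2; simp [PySem.Dict.ofList, PySem.Dict.update, PySem.Dict.insert, PySem.Dict.contains, PySem.Dict.empty, PySem.Dict.get?, encChar]
  by_cases h3 : c = '<'
  · subst h3; simp [PySem.Dict.ofList, PySem.Dict.update, PySem.Dict.insert, PySem.Dict.contains, PySem.Dict.empty, PySem.Dict.get?, encChar]
  by_cases h4 : c = '\t'
  · subst h4; simp [PySem.Dict.ofList, PySem.Dict.update, PySem.Dict.insert, PySem.Dict.contains, PySem.Dict.empty, PySem.Dict.get?, encChar]
  by_cases h5 : c = '\n'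
  · subst h5; simp [PySem.Dict.ofList, PySem.Dict.update, PySem.Dict.insert, PySem.Dict.contains, PySem.Dict.empty, PySem.Dict.get?, encChar]
  · have g1 : ('&' == c) = false := by simp only [beq_eq_false_iff_ne]; exact fun hh => h1 hh.symm
    have g2 : ('>' == c) = false := by simp only [beq_eq_false_iff_ne]; exact fun hh => h2 hh.symm
    have g3 : ('<' == c) = false := by simp only [beq_eq_false_iff_ne]; exact fun hh => h3 hh.symm
    have g4 : ('\t' == c) = false := by simp only [beq_eq_false_iff_ne]; exact fun hh => h4 hh.symm
    have g5 : ('\n' == c) = false := by simp only [beq_eq_false_iff_ne]; exact fun hh => h5 hh.symm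
    simp [PySem.Dict.ofList, PySem.Dict.update, PySem.Dict.insert, PySem.Dict.contains, PySem.Dict.empty, PySem.Dict.get?, encChar, g1, g2, g3, g4, g5, h1, h2, h3, h4, h5]

-- ===== VERDICT (by name: the statement is the Claim_ definition above) =====
theorem escape_code_spec : Claim_equal_escape_code := by
  intro text tab_size _
  unfold Spec_escape_code
  apply String.toList_inj.mp
  show (escape_code text tab_size).toList = (escape_code_alt text tab_size).toList
  unfold escape_code escape_code_alt
  simp only [PySem.Str.toList_join, PySem.Str.toList_replace]
  rw [show ("&" : String).toList = ['&'] from rfl, show (">" : String).toList = ['>'] from rfl,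
      show ("<" : String).toList = ['<'] from rfl, show ("\t" : String).toList = ['\t'] from rfl,
      show ("\n" : String).toList = ['\n'] from rfl,
      show (String.ofList (List.replicate tab_size.toNat ' ')).toList = List.replicate tab_size.toNat ' ' by simp]
  rw [replace_single, replace_single, replace_single, replace_single, replace_single]
  rw [chain_eq_enc]
  rw [show ("" : String).toList = [] from rfl, join_nil_eq_flatten]
  rw [List.map_map, List.flatten_eq_flatMap, List.flatMap_map]
  exact List.flatMap_congr (fun c _ => lookup_eq_enc tab_size c)
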